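-- pv_equiv track=rewrite | github.com/DIG-Network/proof_research | sub-problems/verifier-oracle-model/experiments/adaptive-coordinate-or-rsparse-xor-tree-depth-wt-seven-eight-n14/script.py | build_r_xor_partition_masks
-- ===== SOURCE A (Python) =====
-- from itertools import combinations
--
-- N = 14
--
-- def build_r_xor_partition_masks(masks: list[int], r: int) -> list[tuple[int, int]]:
--     dom = len(masks)
--     full = (1 << dom) - 1
--     out: list[tuple[int, int]] = []
--     for idxs in combinations(range(N), r):
--         b0 = 0
--         for ki, mm in enumerate(masks):
--             p = 0
--             for i in idxs:
--                 p ^= (mm >> i) & 1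
--             if p == 0:
--                 b0 |= 1 << ki
--         b1 = full ^ b0
--         out.append((b0, b1))
--     return out
-- ===== SOURCE B (Python) =====
-- from itertools import combinations
--
-- N = 14
--
-- def build_r_xor_partition_masks(masks: list[int], r: int) -> list[tuple[int, int]]:
--     if r > N:
--         return []  # combinations(range(N), r) is empty; nothing to build
--     full = (1 << len(masks)) - 1
--     # Transpose once: col[i] packs bit i of every mask across the mask axis.
--     col = [0] * N
--     for ki, mm in enumerate(masks):
--         for i in range(N):
--             if (mm >> i) & 1:
--                 col[i] |= 1 << ki
--     out: list[tuple[int, int]] = []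
--     for idxs in combinations(range(N), r):
--         odd = 0
--         for i in idxs:
--             odd ^= col[i]
--         out.append((full ^ odd, odd))
--     return out
-- ===== Notes on version B (the rewrite author's own statement) =====
-- stated objective: alternative
-- what changed: B transposes the mask matrix once into 14 column bitmasks (col[i] holds bit i of every mask packed over the mask axis), so per combination the whole per-mask scan with its inner parity loop disappears: the result is a single XOR of r column masks, emitted as (full^odd, odd); when combinations(range(14), r) is empty B returns [] without building anything.
import Mathlib
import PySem

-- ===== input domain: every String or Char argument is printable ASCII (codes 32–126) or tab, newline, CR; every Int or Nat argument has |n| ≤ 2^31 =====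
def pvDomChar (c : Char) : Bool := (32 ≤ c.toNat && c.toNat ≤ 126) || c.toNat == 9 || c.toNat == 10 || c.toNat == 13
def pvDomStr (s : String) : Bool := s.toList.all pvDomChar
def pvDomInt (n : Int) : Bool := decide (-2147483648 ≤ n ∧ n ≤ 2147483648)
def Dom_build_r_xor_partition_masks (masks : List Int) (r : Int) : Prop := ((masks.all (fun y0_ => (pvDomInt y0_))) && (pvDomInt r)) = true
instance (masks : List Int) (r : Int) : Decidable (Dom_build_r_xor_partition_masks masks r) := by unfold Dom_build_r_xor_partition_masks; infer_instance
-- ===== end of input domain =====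

-- B transposes the masks once into 14 column bitmasks so that each combination's answer is a
-- single XOR of r column masks, removing A's whole per-mask scan with its inner parity loop
-- (an alternative, bit-parallel formulation).

-- ===== PORT A =====
def build_r_xor_partition_masks (masks : List Int) (r : Int) : List (Int × Int) :=
  let dom := masks.length
  let full : Int := ((1 : Int) <<< dom) - 1
  (PySem.List.combinations (PySem.List.pyRange 0 14 1) r.toNat).foldl
    (fun out idxs =>
      let b0 : Int := (PySem.List.enumerate masks).foldl
        (fun b0 kimm =>
          let p : Int := idxs.foldl
            (fun p i => PySem.Int.bxor p (PySem.Int.band (kimm.2 >>> i.toNat) 1)) 0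
          if p = 0 then PySem.Int.bor b0 ((1 : Int) <<< kimm.1.toNat) else b0) 0
      let b1 : Int := PySem.Int.bxor full b0
      out ++ [(b0, b1)]) []

-- ===== PORT B =====
-- (col is accessed only at indices i from range(14), always in range; set/getD are exact there)
def build_r_xor_partition_masks_alt (masks : List Int) (r : Int) : List (Int × Int) :=
  if 14 < r then []  -- combinations(range(14), r) is empty; nothing to build
  else
  let full : Int := ((1 : Int) <<< masks.length) - 1
  let col : List Int := (PySem.List.enumerate masks).foldl
    (fun col kimm =>
      (PySem.List.pyRange 0 14 1).foldl
        (fun col i =>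
          if PySem.Int.band (kimm.2 >>> i.toNat) 1 ≠ 0 then
            col.set i.toNat (PySem.Int.bor (col.getD i.toNat 0) ((1 : Int) <<< kimm.1.toNat))
          else col) col)
    (List.replicate 14 (0 : Int))
  (PySem.List.combinations (PySem.List.pyRange 0 14 1) r.toNat).foldl
    (fun out idxs =>
      let odd : Int := idxs.foldl (fun odd i => PySem.Int.bxor odd (col.getD i.toNat 0)) 0
      out ++ [(PySem.Int.bxor full odd, odd)]) []

-- ===== PRECONDITION & SPEC =====
-- Pre_ excludes exactly r < 0, on which Python's combinations(range(14), r) raises ValueError (in both A and B).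
def Pre_build_r_xor_partition_masks (masks : List Int) (r : Int) : Prop := 0 ≤ r
instance (masks : List Int) (r : Int) : Decidable (Pre_build_r_xor_partition_masks masks r) := by
  unfold Pre_build_r_xor_partition_masks; infer_instance

def pvWitness_build_r_xor_partition_masks : List Int × Int := ([5, -3, 12], 2)

def Spec_build_r_xor_partition_masks (masks : List Int) (r : Int) (out : List (Int × Int)) : Prop :=
  out = build_r_xor_partition_masks_alt masks r
instance (masks : List Int) (r : Int) (out : List (Int × Int)) : Decidable (Spec_build_r_xor_partition_masks masks r out) := by
  unfold Spec_build_r_xor_partition_masks; infer_instance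

-- ===== CLAIM (what is proved, stated in full; the proofs are below) =====
def Claim_equal_build_r_xor_partition_masks : Prop := ∀ (masks : List Int) (r : Int), Dom_build_r_xor_partition_masks masks r → Pre_build_r_xor_partition_masks masks r → Spec_build_r_xor_partition_masks masks r (build_r_xor_partition_masks masks r)

-- ===== LEMMAS AND PROOFS =====

-- bit i of mm as Python's (mm >> i) & 1 sees it, i < 14: a testBit of the low-14-bit residue
def pvBit (mm : Int) (i : Nat) : Bool := (mm % 16384).toNat.testBit i

-- Python's (mm >> i) & 1 (as % 2) equals pvBit for i < 14
theorem pv_bitA (mm : Int) (i : Nat) (hi : i < 14) :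
    PySem.Int.mod (mm >>> i) 2 = ((((mm % 16384).toNat.testBit i).toNat : Nat) : Int) := by
  rw [PySem.Int.mod_eq_emod_of_pos (by norm_num)]
  rw [Int.shiftRight_eq_div_pow]
  set q : Int := mm / 16384 with hqdef
  set m : Int := mm % 16384 with hmdef
  have hm0 : 0 ≤ m := Int.emod_nonneg mm (by norm_num)
  have hmlt : m < 16384 := Int.emod_lt_of_pos mm (by norm_num)
  have hdecomp : mm = 16384 * q + m := by
    rw [hqdef, hmdef]; omega
  have hpow : (16384 : Int) = 2 ^ i * 2 ^ (14 - i) := by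
    have hi14 : i + (14 - i) = 14 := by omega
    rw [← pow_add, hi14]
    norm_num
  have hmm' : mm = m + (2 ^ (14 - i) * q) * 2 ^ i := by
    rw [hdecomp, hpow]; ring
  have hdiv : mm / ((2 ^ i : Nat) : Int) = m / 2 ^ i + 2 ^ (14 - i) * q := by
    rw [hmm']
    push_cast
    exact Int.add_mul_ediv_right m (2 ^ (14 - i) * q) (by positivity)
  rw [hdiv]
  have h2dvd : (2 : Int) ∣ 2 ^ (14 - i) * q := by
    have : 14 - i = (13 - i) + 1 := by omega
    rw [this, pow_succ]
    exact ⟨2 ^ (13 - i) * q, by ring⟩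
  obtain ⟨k, hk⟩ := h2dvd
  have : m / 2 ^ i + 2 ^ (14 - i) * q = m / 2 ^ i + k * 2 := by rw [hk]; ring
  rw [this]
  have hmod2 : (m / 2 ^ i + k * 2) % 2 = (m / 2 ^ i) % 2 := by omega
  rw [hmod2]
  have hmnat : m = ((m.toNat : Nat) : Int) := by omega
  rw [hmnat]
  have hc1 : ((m.toNat : Nat) : Int) / 2 ^ i = (((m.toNat / 2 ^ i : Nat) : Nat) : Int) := by
    push_cast; ring_nf
  have hc2 : (((m.toNat / 2 ^ i : Nat) : Nat) : Int) % 2 = (((m.toNat / 2 ^ i % 2 : Nat) : Nat) : Int) := by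
    push_cast; ring_nf
  rw [hc1, hc2]
  have htb : m.toNat.testBit i = decide (m.toNat / 2 ^ i % 2 = 1) := by
    have := Nat.testBit_div_two_pow (n := i) m.toNat 0
    rw [Nat.zero_add] at this
    rw [← this, Nat.testBit_zero]
  rw [Int.toNat_natCast, htb]
  have h01 : m.toNat / 2 ^ i % 2 = 0 ∨ m.toNat / 2 ^ i % 2 = 1 := by omega
  rcases h01 with h' | h' <;> simp [h']

-- A's xor fold computes the parity of the count of set selected bits
theorem pv_parity (mm : Int) (ms : List Nat) (h2 : ∀ j ∈ ms, j < 14) :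
    ∀ p : Nat, p < 2 →
      ms.foldl (fun (q : Int) (j : Nat) => PySem.Int.bxor q (PySem.Int.band (mm >>> j) 1)) ((p : Nat) : Int)
        = (((p + ms.countP (fun j => pvBit mm j)) % 2 : Nat) : Int) := by
  induction ms with
  | nil =>
    intro p hp
    simp only [List.foldl_nil, List.countP_nil, Nat.add_zero]
    congr 1
    omega
  | cons a t iht =>
    intro p hp
    have ha : a < 14 := h2 a (by simp)
    have hband : PySem.Int.band (mm >>> a) 1 = (((pvBit mm a).toNat : Nat) : Int) := by
      rw [PySem.Int.band_one]; exact pv_bitA mm a ha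
    simp only [List.foldl_cons]
    rw [hband, PySem.Int.bxor_natCast]
    set b : Nat := (pvBit mm a).toNat with hb
    have hble : b ≤ 1 := Bool.toNat_le _
    have hxor : p ^^^ b = (p + b) % 2 := by
      interval_cases p <;> interval_cases b <;> decide
    rw [hxor, iht (fun j hj => h2 j (by simp [hj])) ((p + b) % 2) (by omega)]
    congr 1
    rw [List.countP_cons]
    have hbb : (if pvBit mm a = true then 1 else 0) = b := by
      rw [hb]; cases pvBit mm a <;> simp
    omega

-- the or-accumulation over masks with index counter, on the Nat side
def pvOrF (P : Int → Prop) [DecidablePred P] : List Int → Nat → Nat → Nat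
  | [], _, b => b
  | mm :: t, s, b => pvOrF P t (s + 1) (if P mm then b ||| 2 ^ s else b)

theorem pvOrF_testBit (P : Int → Prop) [DecidablePred P] :
    ∀ (ms : List Int) (s b k : Nat),
      (pvOrF P ms s b).testBit k
        = (b.testBit k || (decide (s ≤ k) && decide (k < s + ms.length) && decide (P (ms.getD (k - s) 0)))) := by
  intro ms
  induction ms with
  | nil =>
    intro s b k
    by_cases hs : s ≤ k
    · have hk : ¬ k < s + ([] : List Int).length := by simp; omega
      simp [pvOrF, hs, hk]
    · simp [pvOrF, hs]
  | cons mm t ih =>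
    intro s b k
    simp only [pvOrF]
    rw [ih]
    have hb' : (if P mm then b ||| 2 ^ s else b).testBit k
        = (b.testBit k || (decide (P mm) && decide (k = s))) := by
      by_cases hp : P mm
      · simp [hp, Nat.testBit_or, Nat.testBit_two_pow, eq_comm]
      · simp [hp]
    rw [hb']
    by_cases hks : k = s
    · subst hks
      have e1 : ¬ (k + 1 ≤ k) := by omega
      have e2 : k ≤ k := le_refl k
      have e3 : k < k + (mm :: t).length := by simp
      have e4 : k - k = 0 := by omega
      simp only [e1, e2, e3, e4, decide_true, decide_false, decide_eq_true_eq,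
        Bool.false_and, Bool.and_false, Bool.or_false, Bool.true_and, List.getD_cons_zero]
      cases b.testBit k <;> cases hd : decide (P mm) <;> simp_all
    · rcases lt_or_gt_of_ne hks with hlt | hgt
      · have e1 : ¬ (s + 1 ≤ k) := by omega
        have e2 : ¬ (s ≤ k) := by omega
        simp [e1, e2, hks]
      · have e1 : s + 1 ≤ k := by omega
        have e2 : s ≤ k := by omega
        have e3 : (k < s + 1 + t.length) ↔ (k < s + (mm :: t).length) := by
          simp only [List.length_cons]; omega
        have e3' : decide (k < s + 1 + t.length) = decide (k < s + (mm :: t).length) :=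
          decide_eq_decide.mpr e3
        have e4 : k - s = (k - (s + 1)) + 1 := by omega
        simp only [e1, e2, decide_true, Bool.true_and, hks, decide_false, Bool.and_false,
          Bool.or_false, e4, List.getD_cons_succ, e3']

theorem pv_shl (s : Nat) : (1 : Int) <<< s = ((2 ^ s : Nat) : Int) := by
  rw [Int.shiftLeft_eq, one_mul]; push_cast; ring

-- A's b0 accumulation equals pvOrF
theorem pv_orA (P : Int → Prop) [DecidablePred P] :
    ∀ (ms : List Int) (s b : Nat),
      (PySem.List.enumerate ms ((s : Nat) : Int)).foldl
        (fun v kimm => if P kimm.2 then PySem.Int.bor v ((1 : Int) <<< kimm.1.toNat) else v) ((b : Nat) : Int)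
      = ((pvOrF P ms s b : Nat) : Int) := by
  intro ms
  induction ms with
  | nil => intro s b; simp [pvOrF, PySem.List.enumerate_nil]
  | cons mm t ih =>
    intro s b
    rw [PySem.List.enumerate_cons]
    simp only [List.foldl_cons]
    have hcast : ((s : Nat) : Int) + 1 = (((s + 1 : Nat)) : Int) := by push_cast; ring
    have htn : (((s : Nat) : Int)).toNat = s := Int.toNat_natCast s
    have hstep : (if P mm then PySem.Int.bor ((b : Nat) : Int) ((1 : Int) <<< s) else ((b : Nat) : Int))
        = (((if P mm then b ||| 2 ^ s else b) : Nat) : Int) := by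
      by_cases hp : P mm
      · rw [if_pos hp, if_pos hp, pv_shl, PySem.Int.bor_natCast]
      · rw [if_neg hp, if_neg hp]
    simp only [htn]
    simp only [Int.shiftLeft_natCast_right] at ih ⊢
    rw [hstep, hcast, ih (s + 1) (if P mm then b ||| 2 ^ s else b)]
    simp only [pvOrF]

-- B's per-column accumulation on the Int side
def pvEntF (i : Nat) : List Int → Nat → Int → Int
  | [], _, v => v
  | mm :: t, s, v =>
    pvEntF i t (s + 1) (if PySem.Int.band (mm >>> i) 1 ≠ 0 then PySem.Int.bor v ((1 : Int) <<< s) else v)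

theorem pvEntF_natCast (i : Nat) :
    ∀ (ms : List Int) (s b : Nat),
      pvEntF i ms s ((b : Nat) : Int)
        = ((pvOrF (fun mm => PySem.Int.band (mm >>> i) 1 ≠ 0) ms s b : Nat) : Int) := by
  intro ms
  induction ms with
  | nil => intro s b; simp [pvEntF, pvOrF]
  | cons mm t ih =>
    intro s b
    simp only [pvEntF, pvOrF]
    have hstep : (if PySem.Int.band (mm >>> i) 1 ≠ 0 then PySem.Int.bor ((b : Nat) : Int) ((1 : Int) <<< s) else ((b : Nat) : Int))
        = (((if PySem.Int.band (mm >>> i) 1 ≠ 0 then b ||| 2 ^ s else b) : Nat) : Int) := by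
      by_cases hp : PySem.Int.band (mm >>> i) 1 ≠ 0
      · rw [if_pos hp, if_pos hp, pv_shl, PySem.Int.bor_natCast]
      · rw [if_neg hp, if_neg hp]
    rw [hstep, ih (s + 1) (if PySem.Int.band (mm >>> i) 1 ≠ 0 then b ||| 2 ^ s else b)]

-- generic: a fold of per-index in-place updates touches each index once
theorem pv_setfold (g : Nat → Int → Int) (h : List Int → Nat → List Int)
    (hset : ∀ c j, j < c.length → (h c j).getD j 0 = g j (c.getD j 0))
    (hother : ∀ c j i, i ≠ j → (h c j).getD i 0 = c.getD i 0)
    (hlen : ∀ c j, (h c j).length = c.length) :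
    ∀ (js : List Nat) (c : List Int), js.Nodup → (∀ j ∈ js, j < c.length) →
      (js.foldl h c).length = c.length ∧
      (∀ i ∈ js, (js.foldl h c).getD i 0 = g i (c.getD i 0)) ∧
      (∀ i, i ∉ js → (js.foldl h c).getD i 0 = c.getD i 0) := by
  intro js
  induction js with
  | nil => intro c _ _; exact ⟨rfl, by simp, fun i _ => rfl⟩
  | cons j t ih =>
    intro c hnd hbound
    have hndt := List.nodup_cons.mp hnd
    have hlen' : (h c j).length = c.length := hlen c j
    have hbt : ∀ x ∈ t, x < (h c j).length := by
      intro x hx; rw [hlen']; exact hbound x (by simp [hx])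
    obtain ⟨ihlen, ihmem, ihnot⟩ := ih (h c j) hndt.2 hbt
    refine ⟨by simp only [List.foldl_cons]; rw [ihlen, hlen'], ?_, ?_⟩
    · intro i hi
      simp only [List.foldl_cons]
      rcases List.mem_cons.mp hi with rfl | hit
      · rw [ihnot i hndt.1, hset c i (hbound i (by simp))]
      · have hne : i ≠ j := fun e => hndt.1 (e ▸ hit)
        rw [ihmem i hit, hother c j i hne]
    · intro i hni
      simp only [List.foldl_cons]
      rw [ihnot i (fun hit => hni (by simp [hit])),
        hother c j i (fun hij => hni (by simp [hij]))]

-- B's inner range(14) fold, entrywise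
theorem pv_inner (mm sv : Int) (c : List Int) (hc : c.length = 14) :
    ((PySem.List.pyRange 0 14 1).foldl
        (fun c i => if PySem.Int.band (mm >>> i.toNat) 1 ≠ 0 then
            c.set i.toNat (PySem.Int.bor (c.getD i.toNat 0) sv) else c) c).length = 14 ∧
    ∀ i, i < 14 →
      ((PySem.List.pyRange 0 14 1).foldl
        (fun c i => if PySem.Int.band (mm >>> i.toNat) 1 ≠ 0 then
            c.set i.toNat (PySem.Int.bor (c.getD i.toNat 0) sv) else c) c).getD i 0
      = (if PySem.Int.band (mm >>> i) 1 ≠ 0 then PySem.Int.bor (c.getD i 0) sv else c.getD i 0) := by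
  have hconv : ∀ (F : List Int → Int → List Int) (c : List Int),
      (PySem.List.pyRange 0 14 1).foldl F c
        = (List.range 14).foldl (fun c n => F c ((n : Nat) : Int)) c := by
    intro F c; rfl
  rw [hconv]
  simp only [Int.toNat_natCast, Int.shiftRight_natCast_right, Int.shiftLeft_natCast_right]
  have hmain := pv_setfold
    (fun j v => if PySem.Int.band (mm >>> j) 1 ≠ 0 then PySem.Int.bor v sv else v)
    (fun c j => if PySem.Int.band (mm >>> j) 1 ≠ 0 then c.set j (PySem.Int.bor (c.getD j 0) sv) else c)
    (by
      intro c j hj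
      by_cases hp : PySem.Int.band (mm >>> j) 1 ≠ 0
      · simp [hp, List.getD, List.getElem?_set_self hj]
      · simp [hp])
    (by
      intro c j i hne
      by_cases hp : PySem.Int.band (mm >>> j) 1 ≠ 0
      · simp [hp, List.getD, List.getElem?_set_ne (Ne.symm hne)]
      · simp [hp])
    (by
      intro c j
      by_cases hp : PySem.Int.band (mm >>> j) 1 ≠ 0 <;> simp [hp])
    (List.range 14) c (List.nodup_range) (by intro j hj; rw [hc]; exact List.mem_range.mp hj)
  obtain ⟨hl, hm, _⟩ := hmain
  exact ⟨by rw [hl, hc], fun i hi => hm i (List.mem_range.mpr hi)⟩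

-- B's whole col-building fold, entrywise
theorem pv_colfold :
    ∀ (ms : List Int) (s : Nat) (c : List Int), c.length = 14 →
      (((PySem.List.enumerate ms ((s : Nat) : Int)).foldl
        (fun col kimm =>
          (PySem.List.pyRange 0 14 1).foldl
            (fun col i =>
              if PySem.Int.band (kimm.2 >>> i.toNat) 1 ≠ 0 then
                col.set i.toNat (PySem.Int.bor (col.getD i.toNat 0) ((1 : Int) <<< kimm.1.toNat))
              else col) col) c).length = 14) ∧
      (∀ i, i < 14 →
        ((PySem.List.enumerate ms ((s : Nat) : Int)).foldl
        (fun col kimm =>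
          (PySem.List.pyRange 0 14 1).foldl
            (fun col i =>
              if PySem.Int.band (kimm.2 >>> i.toNat) 1 ≠ 0 then
                col.set i.toNat (PySem.Int.bor (col.getD i.toNat 0) ((1 : Int) <<< kimm.1.toNat))
              else col) col) c).getD i 0 = pvEntF i ms s (c.getD i 0)) := by
  intro ms
  induction ms with
  | nil =>
    intro s c hc
    exact ⟨by simpa [PySem.List.enumerate_nil] using hc,
      fun i hi => by simp [PySem.List.enumerate_nil, pvEntF]⟩
  | cons mm t ih =>
    intro s c hc
    rw [PySem.List.enumerate_cons]
    simp only [List.foldl_cons, Int.toNat_natCast]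
    simp only [Int.shiftLeft_natCast_right, Int.shiftRight_natCast_right] at ih ⊢
    have hin := pv_inner mm ((1 : Int) <<< s) c hc
    simp only [Int.shiftLeft_natCast_right, Int.shiftRight_natCast_right] at hin
    obtain ⟨hl', he'⟩ := hin
    have hcast : ((s : Nat) : Int) + 1 = (((s + 1 : Nat)) : Int) := by push_cast; ring
    rw [hcast]
    obtain ⟨ihl, ihe⟩ := ih (s + 1) _ hl'
    refine ⟨by rw [ihl], ?_⟩
    intro i hi
    rw [ihe i hi, he' i hi]
    simp only [pvEntF]

-- xor folds over Nat casts
theorem pv_xorfold (F : Nat → Nat) :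
    ∀ (l : List Nat) (b : Nat),
      l.foldl (fun (o : Int) i => PySem.Int.bxor o ((F i : Nat) : Int)) ((b : Nat) : Int)
        = ((l.foldl (fun o i => o ^^^ F i) b : Nat) : Int) := by
  intro l
  induction l with
  | nil => intro b; rfl
  | cons a t ih =>
    intro b
    simp only [List.foldl_cons, PySem.Int.bxor_natCast]
    exact ih (b ^^^ F a)

theorem pv_xorbits (F : Nat → Nat) :
    ∀ (l : List Nat) (b k : Nat),
      (l.foldl (fun o i => o ^^^ F i) b).testBit k
        = xor (b.testBit k) (decide (l.countP (fun i => (F i).testBit k) % 2 = 1)) := by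
  intro l
  induction l with
  | nil => intro b k; simp
  | cons a t ih =>
    intro b k
    simp only [List.foldl_cons, List.countP_cons]
    rw [ih (b ^^^ F a) k, Nat.testBit_xor]
    rcases Nat.mod_two_eq_zero_or_one (t.countP (fun i => (F i).testBit k)) with hm | hm
    · have h0 : ∀ x : Nat, x % 2 = 0 → decide (x % 2 = 1) = false := by intro x hx; simp [hx]
      cases hfk : (F a).testBit k <;> cases hbk : b.testBit k <;>
        simp [hfk, hbk, hm, Nat.add_mod]
    · cases hfk : (F a).testBit k <;> cases hbk : b.testBit k <;>
        simp [hfk, hbk, hm, Nat.add_mod]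

-- index lists coming from combinations of range(14) are nodup and bounded
theorem pv_props (idxs : List Int) (k : Nat)
    (h : idxs ∈ PySem.List.combinations (PySem.List.pyRange 0 14 1) k) :
    idxs.Nodup ∧ ∀ i ∈ idxs, 0 ≤ i ∧ i < 14 := by
  obtain ⟨hs, _⟩ := (PySem.List.mem_combinations_iff _ _ _).mp h
  have hpr : PySem.List.pyRange 0 14 1 = [0,1,2,3,4,5,6,7,8,9,10,11,12,13] := by decide
  rw [hpr] at hs
  constructor
  · exact hs.nodup (by decide)
  · intro i hi
    have hmem := hs.subset hi
    revert hmem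
    have : ∀ i ∈ ([0,1,2,3,4,5,6,7,8,9,10,11,12,13] : List Int), 0 ≤ i ∧ i < 14 := by decide
    exact this i

-- complementary bit patterns below 2^L are xor-complements
theorem pv_xor_pair (L : Nat) (C : Nat → Bool) (X Y : Nat)
    (hX : ∀ k, X.testBit k = (decide (k < L) && !(C k)))
    (hY : ∀ k, Y.testBit k = (decide (k < L) && C k)) :
    X = (2 ^ L - 1) ^^^ Y ∧ (2 ^ L - 1) ^^^ X = Y := by
  constructor
  · apply Nat.eq_of_testBit_eq
    intro k
    rw [Nat.testBit_xor, Nat.testBit_two_pow_sub_one, hX k, hY k]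
    by_cases hk : k < L
    · cases C k <;> simp [hk]
    · simp [hk]
  · apply Nat.eq_of_testBit_eq
    intro k
    rw [Nat.testBit_xor, Nat.testBit_two_pow_sub_one, hX k, hY k]
    by_cases hk : k < L
    · cases C k <;> simp [hk]
    · simp [hk]

-- per combination: A's appended pair equals B's appended pair
theorem pv_pair (masks : List Int) (idxs : List Int) (h1 : idxs.Nodup)
    (h2 : ∀ i ∈ idxs, 0 ≤ i ∧ i < 14) (col : List Int)
    (hcol : ∀ i, i < 14 →
      col.getD i 0 = ((pvOrF (fun mm => PySem.Int.band (mm >>> i) 1 ≠ 0) masks 0 0 : Nat) : Int))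
    (acc : List (Int × Int)) :
    acc ++ [((PySem.List.enumerate masks).foldl
        (fun (b0 : Int) (kimm : Int × Int) =>
          if idxs.foldl (fun (p : Int) (i : Int) => PySem.Int.bxor p (PySem.Int.band (kimm.2 >>> i.toNat) 1)) 0 = 0
          then PySem.Int.bor b0 ((1 : Int) <<< kimm.1.toNat) else b0) 0,
      PySem.Int.bxor (((1 : Int) <<< masks.length) - 1)
        ((PySem.List.enumerate masks).foldl
        (fun (b0 : Int) (kimm : Int × Int) =>
          if idxs.foldl (fun (p : Int) (i : Int) => PySem.Int.bxor p (PySem.Int.band (kimm.2 >>> i.toNat) 1)) 0 = 0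
          then PySem.Int.bor b0 ((1 : Int) <<< kimm.1.toNat) else b0) 0))]
    = acc ++ [(PySem.Int.bxor (((1 : Int) <<< masks.length) - 1)
        (idxs.foldl (fun (odd : Int) (i : Int) => PySem.Int.bxor odd (col.getD i.toNat 0)) 0),
      idxs.foldl (fun (odd : Int) (i : Int) => PySem.Int.bxor odd (col.getD i.toNat 0)) 0)] := by
  have hN : ∀ j ∈ idxs.map (fun i : Int => i.toNat), j < 14 := by
    intro j hj
    obtain ⟨i, hi, rfl⟩ := List.mem_map.mp hj
    have := h2 i hi
    omega
  have hL1 : ((1 : Int) <<< masks.length) - 1 = ((2 ^ masks.length - 1 : Nat) : Int) := by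
    rw [pv_shl, Nat.cast_sub Nat.one_le_two_pow, Nat.cast_one]
  -- B's odd fold as a Nat
  have hstep1 : (idxs.map (fun i : Int => i.toNat)).foldl
        (fun (o : Int) (j : Nat) => PySem.Int.bxor o (col.getD j 0)) (0 : Int)
      = idxs.foldl (fun (o : Int) (i : Int) => PySem.Int.bxor o (col.getD i.toNat 0)) (0 : Int) :=
    List.foldl_map
  have hstep2 : (idxs.map (fun i : Int => i.toNat)).foldl
        (fun (o : Int) (j : Nat) => PySem.Int.bxor o (col.getD j 0)) (0 : Int)
      = (idxs.map (fun i : Int => i.toNat)).foldl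
        (fun (o : Int) (j : Nat) =>
          PySem.Int.bxor o ((pvOrF (fun mm => PySem.Int.band (mm >>> j) 1 ≠ 0) masks 0 0 : Nat) : Int)) (0 : Int) :=
    PySem.List.foldl_congr_mem _ _ _ _ (by
      intro o j hj
      rw [hcol j (hN j hj)])
  have hstep3 := pv_xorfold (fun j => pvOrF (fun mm => PySem.Int.band (mm >>> j) 1 ≠ 0) masks 0 0)
    (idxs.map (fun i : Int => i.toNat)) 0
  simp only [Nat.cast_zero] at hstep3
  have hodd : idxs.foldl (fun odd i => PySem.Int.bxor odd (col.getD i.toNat 0)) 0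
      = (((idxs.map (fun i : Int => i.toNat)).foldl
          (fun (o : Nat) (j : Nat) => o ^^^ pvOrF (fun mm => PySem.Int.band (mm >>> j) 1 ≠ 0) masks 0 0) 0 : Nat) : Int) := by
    rw [← hstep1, hstep2, hstep3]
  -- A's b0 fold as a Nat
  have hb0 := pv_orA (fun mm => idxs.foldl (fun p i => PySem.Int.bxor p (PySem.Int.band (mm >>> i.toNat) 1)) 0 = 0) masks 0 0
  simp only [Nat.cast_zero] at hb0
  -- A's branch condition as a parity
  have hPiff : ∀ mk : Int,
      (idxs.foldl (fun (p : Int) (i : Int) => PySem.Int.bxor p (PySem.Int.band (mk >>> i.toNat) 1)) 0 = 0)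
        ↔ (idxs.map (fun i : Int => i.toNat)).countP (fun j => pvBit mk j) % 2 = 0 := by
    intro mk
    have hf : (idxs.map (fun i : Int => i.toNat)).foldl
          (fun (q : Int) (j : Nat) => PySem.Int.bxor q (PySem.Int.band (mk >>> j) 1)) (((0 : Nat)) : Int)
        = idxs.foldl (fun (q : Int) (i : Int) => PySem.Int.bxor q (PySem.Int.band (mk >>> i.toNat) 1)) (((0 : Nat)) : Int) :=
      List.foldl_map
    rw [pv_parity mk (idxs.map (fun i : Int => i.toNat)) hN 0 (by norm_num)] at hf
    simp only [Nat.cast_zero, Nat.zero_add] at hf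
    rw [← hf]
    constructor
    · intro h
      exact_mod_cast h
    · intro h
      rw [h]; rfl
  -- rewrite the goal to Nat casts
  simp only [Int.shiftRight_natCast_right, Int.shiftLeft_natCast_right] at hb0 ⊢
  rw [hodd, hb0, hL1, PySem.Int.bxor_natCast, PySem.Int.bxor_natCast]
  -- the two bit characterisations, then the xor-complement identities
  obtain ⟨hmain1, hmain2⟩ := pv_xor_pair masks.length
    (fun k => decide ((idxs.map (fun i : Int => i.toNat)).countP (fun (j : Nat) => pvBit (masks.getD k 0) j) % 2 = 1))
    (pvOrF (fun mm => List.foldl (fun (p : Int) (i : Int) => PySem.Int.bxor p (PySem.Int.band (mm >>> i.toNat) 1)) 0 idxs = 0) masks 0 0)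
    ((idxs.map (fun i : Int => i.toNat)).foldl
      (fun (o : Nat) (j : Nat) => o ^^^ pvOrF (fun mm => PySem.Int.band (mm >>> j) 1 ≠ 0) masks 0 0) 0)
    (by
      intro k
      rw [pvOrF_testBit]
      simp only [Nat.zero_testBit, Bool.false_or, Nat.zero_add, Nat.sub_zero, Nat.zero_le,
        decide_true, Bool.true_and]
      congr 1
      have hpar : ∀ n : Nat, (!decide (n % 2 = 1)) = decide (n % 2 = 0) := by
        intro n
        rcases Nat.mod_two_eq_zero_or_one n with hm | hm <;> simp [hm]
      rw [hpar]
      rw [decide_eq_decide]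
      exact hPiff (masks.getD k 0)
    )
    (by
      intro k
      rw [pv_xorbits]
      simp only [Nat.zero_testBit, Bool.false_xor]
      by_cases hk : k < masks.length
      · have hc : ((idxs.map (fun i : Int => i.toNat)).countP (fun (j : Nat) =>
            (pvOrF (fun mm => PySem.Int.band (mm >>> j) 1 ≠ 0) masks 0 0).testBit k))
            = (idxs.map (fun i : Int => i.toNat)).countP (fun (j : Nat) => pvBit (masks.getD k 0) j) := by
          apply List.countP_congr
          intro j hj
          rw [pvOrF_testBit]
          have hj14 := hN j hj
          have hb : PySem.Int.band ((masks.getD k 0) >>> j) 1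
              = (((pvBit (masks.getD k 0) j).toNat : Nat) : Int) := by
            rw [PySem.Int.band_one]
            exact pv_bitA _ j hj14
          simp only [Nat.zero_testBit, Bool.false_or, Nat.zero_add, Nat.sub_zero, Nat.zero_le,
            decide_true, Bool.true_and]
          simp only [hb]
          cases hpv : pvBit (masks.getD k 0) j <;> simp [hpv, hk]
        rw [hc]
        simp [hk]
      · have hc : ((idxs.map (fun i : Int => i.toNat)).countP (fun (j : Nat) =>
            (pvOrF (fun mm => PySem.Int.band (mm >>> j) 1 ≠ 0) masks 0 0).testBit k)) = 0 := by
          apply List.countP_eq_zero.mpr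
          intro j hj
          rw [pvOrF_testBit]
          simp [hk]
        rw [hc]
        simp [hk]
    )
  rw [hmain2, hmain1]

theorem pv_repD (n i : Nat) (d : Int) : (List.replicate n d).getD i d = d := by
  unfold List.getD
  rcases h : (List.replicate n d)[i]? with _ | x
  · rfl
  · have hx : x ∈ List.replicate n d := List.mem_of_getElem? h
    simp [List.eq_of_mem_replicate hx]

-- ===== VERDICT (by name: the statement is the Claim_ definition above) =====
theorem build_r_xor_partition_masks_spec : Claim_equal_build_r_xor_partition_masks := by
  intro masks r _ _
  unfold Spec_build_r_xor_partition_masks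
  show build_r_xor_partition_masks masks r = build_r_xor_partition_masks_alt masks r
  unfold build_r_xor_partition_masks build_r_xor_partition_masks_alt
  by_cases hr : (14 : Int) < r
  · rw [if_pos hr]
    have hlen : (PySem.List.pyRange 0 14 1).length < r.toNat := by
      have h14 : (PySem.List.pyRange 0 14 1).length = 14 := by decide
      omega
    have hnil : PySem.List.combinations (PySem.List.pyRange 0 14 1) r.toNat = [] :=
      PySem.List.combinations_eq_nil_of_length_lt _ hlen
    simp only [hnil, List.foldl_nil]
  rw [if_neg hr]
  obtain ⟨hclen, hcent⟩ := pv_colfold masks 0 (List.replicate 14 0) (by simp)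
  simp only [Nat.cast_zero, Int.shiftRight_natCast_right, Int.shiftLeft_natCast_right] at hcent ⊢
  apply PySem.List.foldl_congr_mem
  intro acc idxs hmem
  obtain ⟨hnd, hbd⟩ := pv_props idxs r.toNat hmem
  refine pv_pair masks idxs hnd hbd _ ?_ acc
  intro i hi
  rw [hcent i hi, pv_repD 14 i 0]
  have hE := pvEntF_natCast i masks 0 0
  simp only [Nat.cast_zero] at hE
  exact hE
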